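-- pv_equiv track=rewrite | github.com/madisonbratina/ChessAI | main.py | selected_square
-- ===== SOURCE A (Python) =====
-- board_size = 480
--
-- block_size = int(board_size / 8)
--
-- def selected_square(num):
--     for x in range(0, board_size, block_size):
--         for y in range(0, board_size, block_size):
--             if x <= num[0] <= x + 60 and y <= num[1] <= y + 60:
--                 x_coord = int(x / 60)
--                 y_coord = int(-(y / 60)+7)
--                 coord = x_coord, y_coord
--     return coord
-- ===== SOURCE B (Python) =====
-- board_size = 480
--
-- block_size = int(board_size / 8)
--
-- def selected_square(num):
--     # Closed form: each axis is independent; the last matching block of A's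
--     # scan is the highest one, i.e. the floor-division block clamped to 7.
--     return (min(num[0] // 60, 7), 7 - min(num[1] // 60, 7))
-- ===== Notes on version B (the rewrite author's own statement) =====
-- stated objective: faster
-- what changed: Replaces the 64-iteration nested range scan with a closed-form per-axis floor division clamped to 7 (the clamp reproduces A's last-assignment-wins tie-break).
import Mathlib
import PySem

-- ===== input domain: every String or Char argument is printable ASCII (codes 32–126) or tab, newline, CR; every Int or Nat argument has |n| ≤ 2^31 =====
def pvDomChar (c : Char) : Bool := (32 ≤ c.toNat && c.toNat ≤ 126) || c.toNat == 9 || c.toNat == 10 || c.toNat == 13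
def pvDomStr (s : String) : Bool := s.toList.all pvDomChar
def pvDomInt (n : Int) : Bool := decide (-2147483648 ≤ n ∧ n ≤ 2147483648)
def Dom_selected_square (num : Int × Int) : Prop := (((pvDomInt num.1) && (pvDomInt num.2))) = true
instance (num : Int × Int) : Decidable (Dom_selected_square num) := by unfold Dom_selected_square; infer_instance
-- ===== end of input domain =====

-- B replaces A's nested 64-step range scan by a closed-form per-axis floor division clamped to 7.

-- ===== PORT A =====
-- Literal port of the nested scan; `coord` is an Option (none = never assigned = UnboundLocalError,
-- excluded by Pre_); int(x/60) on the nonnegative multiples of 60 produced by range is exact x / 60.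
def selected_square (num : Int × Int) : Int × Int :=
  let coord : Option (Int × Int) :=
    (PySem.List.pyRange 0 480 60).foldl (fun acc x =>
      (PySem.List.pyRange 0 480 60).foldl (fun acc y =>
        if x ≤ num.1 ∧ num.1 ≤ x + 60 ∧ y ≤ num.2 ∧ num.2 ≤ y + 60 then
          some (x / 60, -(y / 60) + 7)
        else acc) acc) none
  coord.getD (0, 0)

-- ===== PORT B =====
def selected_square_alt (num : Int × Int) : Int × Int :=
  (min (PySem.Int.floordiv num.1 60) 7, 7 - min (PySem.Int.floordiv num.2 60) 7)

-- ===== PRECONDITION & SPEC =====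
-- Pre_ is exactly the set of inputs on which A returns: outside the 481×481 board A never assigns
-- `coord` and raises UnboundLocalError.
def Pre_selected_square (num : Int × Int) : Prop :=
  0 ≤ num.1 ∧ num.1 ≤ 480 ∧ 0 ≤ num.2 ∧ num.2 ≤ 480
instance (num : Int × Int) : Decidable (Pre_selected_square num) := by
  unfold Pre_selected_square; infer_instance
def pvWitness_selected_square : (Int × Int) := (123, 456)

def Spec_selected_square (num : Int × Int) (out : Int × Int) : Prop := out = selected_square_alt num
instance (num : Int × Int) (out : Int × Int) : Decidable (Spec_selected_square num out) := by unfold Spec_selected_square; infer_instance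

-- ===== CLAIM (what is proved, stated in full; the proofs are below) =====
def Claim_equal_selected_square : Prop := ∀ (num : Int × Int), Dom_selected_square num → Pre_selected_square num → Spec_selected_square num (selected_square num)

-- ===== LEMMAS AND PROOFS =====

-- The inner y-loop of the port, as a named function of the accumulator.
def pvInner (a b x : Int) (acc : Option (Int × Int)) : Option (Int × Int) :=
  (PySem.List.pyRange 0 480 60).foldl (fun acc y =>
    if x ≤ a ∧ a ≤ x + 60 ∧ y ≤ b ∧ b ≤ y + 60 then
      some (x / 60, -(y / 60) + 7)
    else acc) acc

theorem pvRange_eval : PySem.List.pyRange 0 480 60 = [0, 60, 120, 180, 240, 300, 360, 420] := by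
  decide

theorem pvInner_false (a b x : Int) (acc : Option (Int × Int))
    (h : ¬ (x ≤ a ∧ a ≤ x + 60)) : pvInner a b x acc = acc := by
  unfold pvInner
  rw [pvRange_eval]
  simp only [List.foldl]
  repeat rw [if_neg (by tauto)]

theorem pvInner_true (a b x : Int) (acc : Option (Int × Int))
    (hx : x ≤ a) (hx' : a ≤ x + 60) (hb0 : 0 ≤ b) (hb1 : b ≤ 480) :
    pvInner a b x acc = some (x / 60, 7 - min (PySem.Int.floordiv b 60) 7) := by
  unfold pvInner
  rw [pvRange_eval]
  simp only [List.foldl, PySem.Int.floordiv, Int.fdiv_eq_ediv]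
  norm_num
  have hb9 : (0 ≤ b ∧ b ≤ 59) ∨ (60 ≤ b ∧ b ≤ 119) ∨ (120 ≤ b ∧ b ≤ 179) ∨
      (180 ≤ b ∧ b ≤ 239) ∨ (240 ≤ b ∧ b ≤ 299) ∨ (300 ≤ b ∧ b ≤ 359) ∨
      (360 ≤ b ∧ b ≤ 419) ∨ (420 ≤ b ∧ b ≤ 480) := by omega
  rcases hb9 with h | h | h | h | h | h | h | h
  · rw [if_neg (by rintro ⟨-, -, h1, h2⟩; omega), if_neg (by rintro ⟨-, -, h1, h2⟩; omega), if_neg (by rintro ⟨-, -, h1, h2⟩; omega), if_neg (by rintro ⟨-, -, h1, h2⟩; omega), if_neg (by rintro ⟨-, -, h1, h2⟩; omega), if_neg (by rintro ⟨-, -, h1, h2⟩; omega), if_neg (by rintro ⟨-, -, h1, h2⟩; omega), if_pos ⟨hx, hx', by omega, by omega⟩]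
    simp only [Option.some.injEq, Prod.mk.injEq]
    exact ⟨trivial, by omega⟩
  · rw [if_neg (by rintro ⟨-, -, h1, h2⟩; omega), if_neg (by rintro ⟨-, -, h1, h2⟩; omega), if_neg (by rintro ⟨-, -, h1, h2⟩; omega), if_neg (by rintro ⟨-, -, h1, h2⟩; omega), if_neg (by rintro ⟨-, -, h1, h2⟩; omega), if_neg (by rintro ⟨-, -, h1, h2⟩; omega), if_pos ⟨hx, hx', by omega, by omega⟩]
    simp only [Option.some.injEq, Prod.mk.injEq]
    exact ⟨trivial, by omega⟩
  · rw [if_neg (by rintro ⟨-, -, h1, h2⟩; omega), if_neg (by rintro ⟨-, -, h1, h2⟩; omega), if_neg (by rintro ⟨-, -, h1, h2⟩; omega), if_neg (by rintro ⟨-, -, h1, h2⟩; omega), if_neg (by rintro ⟨-, -, h1, h2⟩; omega), if_pos ⟨hx, hx', by omega, by omega⟩]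
    simp only [Option.some.injEq, Prod.mk.injEq]
    exact ⟨trivial, by omega⟩
  · rw [if_neg (by rintro ⟨-, -, h1, h2⟩; omega), if_neg (by rintro ⟨-, -, h1, h2⟩; omega), if_neg (by rintro ⟨-, -, h1, h2⟩; omega), if_neg (by rintro ⟨-, -, h1, h2⟩; omega), if_pos ⟨hx, hx', by omega, by omega⟩]
    simp only [Option.some.injEq, Prod.mk.injEq]
    exact ⟨trivial, by omega⟩
  · rw [if_neg (by rintro ⟨-, -, h1, h2⟩; omega), if_neg (by rintro ⟨-, -, h1, h2⟩; omega), if_neg (by rintro ⟨-, -, h1, h2⟩; omega), if_pos ⟨hx, hx', by omega, by omega⟩]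
    simp only [Option.some.injEq, Prod.mk.injEq]
    exact ⟨trivial, by omega⟩
  · rw [if_neg (by rintro ⟨-, -, h1, h2⟩; omega), if_neg (by rintro ⟨-, -, h1, h2⟩; omega), if_pos ⟨hx, hx', by omega, by omega⟩]
    simp only [Option.some.injEq, Prod.mk.injEq]
    exact ⟨trivial, by omega⟩
  · rw [if_neg (by rintro ⟨-, -, h1, h2⟩; omega), if_pos ⟨hx, hx', by omega, by omega⟩]
    simp only [Option.some.injEq, Prod.mk.injEq]
    exact ⟨trivial, by omega⟩
  · rw [if_pos ⟨hx, hx', by omega, by omega⟩]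
    simp only [Option.some.injEq, Prod.mk.injEq]
    exact ⟨trivial, by omega⟩

theorem selected_square_main : ∀ (num : Int × Int), Pre_selected_square num →
    selected_square num = selected_square_alt num := by
  rintro ⟨a, b⟩ ⟨ha0, ha1, hb0, hb1⟩
  show ((PySem.List.pyRange 0 480 60).foldl (fun acc x => pvInner a b x acc) none).getD (0, 0)
      = (min (PySem.Int.floordiv a 60) 7, 7 - min (PySem.Int.floordiv b 60) 7)
  rw [pvRange_eval]
  simp only [List.foldl]
  have ha9 : (0 ≤ a ∧ a ≤ 59) ∨ (60 ≤ a ∧ a ≤ 119) ∨ (120 ≤ a ∧ a ≤ 179) ∨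
      (180 ≤ a ∧ a ≤ 239) ∨ (240 ≤ a ∧ a ≤ 299) ∨ (300 ≤ a ∧ a ≤ 359) ∨
      (360 ≤ a ∧ a ≤ 419) ∨ (420 ≤ a ∧ a ≤ 480) := by omega
  rcases ha9 with h | h | h | h | h | h | h | h
  · rw [pvInner_false a b 420 _ (by rintro ⟨h1, h2⟩; omega), pvInner_false a b 360 _ (by rintro ⟨h1, h2⟩; omega), pvInner_false a b 300 _ (by rintro ⟨h1, h2⟩; omega), pvInner_false a b 240 _ (by rintro ⟨h1, h2⟩; omega), pvInner_false a b 180 _ (by rintro ⟨h1, h2⟩; omega), pvInner_false a b 120 _ (by rintro ⟨h1, h2⟩; omega), pvInner_false a b 60 _ (by rintro ⟨h1, h2⟩; omega), pvInner_true a b 0 _ (by omega) (by omega) hb0 hb1]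
    simp only [Option.getD_some, Prod.mk.injEq, PySem.Int.floordiv, Int.fdiv_eq_ediv]
    norm_num
    omega
  · rw [pvInner_false a b 420 _ (by rintro ⟨h1, h2⟩; omega), pvInner_false a b 360 _ (by rintro ⟨h1, h2⟩; omega), pvInner_false a b 300 _ (by rintro ⟨h1, h2⟩; omega), pvInner_false a b 240 _ (by rintro ⟨h1, h2⟩; omega), pvInner_false a b 180 _ (by rintro ⟨h1, h2⟩; omega), pvInner_false a b 120 _ (by rintro ⟨h1, h2⟩; omega), pvInner_true a b 60 _ (by omega) (by omega) hb0 hb1]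
    simp only [Option.getD_some, Prod.mk.injEq, PySem.Int.floordiv, Int.fdiv_eq_ediv]
    norm_num
    omega
  · rw [pvInner_false a b 420 _ (by rintro ⟨h1, h2⟩; omega), pvInner_false a b 360 _ (by rintro ⟨h1, h2⟩; omega), pvInner_false a b 300 _ (by rintro ⟨h1, h2⟩; omega), pvInner_false a b 240 _ (by rintro ⟨h1, h2⟩; omega), pvInner_false a b 180 _ (by rintro ⟨h1, h2⟩; omega), pvInner_true a b 120 _ (by omega) (by omega) hb0 hb1]
    simp only [Option.getD_some, Prod.mk.injEq, PySem.Int.floordiv, Int.fdiv_eq_ediv]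
    norm_num
    omega
  · rw [pvInner_false a b 420 _ (by rintro ⟨h1, h2⟩; omega), pvInner_false a b 360 _ (by rintro ⟨h1, h2⟩; omega), pvInner_false a b 300 _ (by rintro ⟨h1, h2⟩; omega), pvInner_false a b 240 _ (by rintro ⟨h1, h2⟩; omega), pvInner_true a b 180 _ (by omega) (by omega) hb0 hb1]
    simp only [Option.getD_some, Prod.mk.injEq, PySem.Int.floordiv, Int.fdiv_eq_ediv]
    norm_num
    omega
  · rw [pvInner_false a b 420 _ (by rintro ⟨h1, h2⟩; omega), pvInner_false a b 360 _ (by rintro ⟨h1, h2⟩; omega), pvInner_false a b 300 _ (by rintro ⟨h1, h2⟩; omega), pvInner_true a b 240 _ (by omega) (by omega) hb0 hb1]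
    simp only [Option.getD_some, Prod.mk.injEq, PySem.Int.floordiv, Int.fdiv_eq_ediv]
    norm_num
    omega
  · rw [pvInner_false a b 420 _ (by rintro ⟨h1, h2⟩; omega), pvInner_false a b 360 _ (by rintro ⟨h1, h2⟩; omega), pvInner_true a b 300 _ (by omega) (by omega) hb0 hb1]
    simp only [Option.getD_some, Prod.mk.injEq, PySem.Int.floordiv, Int.fdiv_eq_ediv]
    norm_num
    omega
  · rw [pvInner_false a b 420 _ (by rintro ⟨h1, h2⟩; omega), pvInner_true a b 360 _ (by omega) (by omega) hb0 hb1]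
    simp only [Option.getD_some, Prod.mk.injEq, PySem.Int.floordiv, Int.fdiv_eq_ediv]
    norm_num
    omega
  · rw [pvInner_true a b 420 _ (by omega) (by omega) hb0 hb1]
    simp only [Option.getD_some, Prod.mk.injEq, PySem.Int.floordiv, Int.fdiv_eq_ediv]
    norm_num
    omega

-- ===== VERDICT (by name: the statement is the Claim_ definition above) =====
theorem selected_square_spec : Claim_equal_selected_square := by
  intro num _ hpre
  exact selected_square_main num hpre
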